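-- pv_equiv track=rewrite | github.com/kieran-source/accent-api | app.py | check_accent_match
-- ===== SOURCE A (Python) =====
-- ACCENT_GROUPS = {
--     'british': ['england', 'scotland', 'wales', 'ireland'],
--     'american': ['us', 'canada'],
-- }
--
-- def check_accent_match(detected, requested):
--     """Check if detected accent matches or is acceptable for requested"""
--     if detected == requested:
--         return True, "exact_match"
--
--     for group, members in ACCENT_GROUPS.items():
--         if detected in members and requested in members:
--             return True, f"group_match_{group}"
--
--     british = ['england', 'scotland', 'wales', 'ireland']
--     american = ['us', 'canada']
--
--     if requested in british and detected in american:
--         return False, "american_instead_of_british"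
--     if requested in american and detected in british:
--         return False, "british_instead_of_american"
--     if requested in british and detected == 'india':
--         return False, "indian_instead_of_british"
--
--     return False, "mismatch"
-- ===== SOURCE B (Python) =====
-- ACCENT_GROUPS = {
--     'british': ['england', 'scotland', 'wales', 'ireland'],
--     'american': ['us', 'canada'],
-- }
--
-- # family of each accent string (india gets its own family); unknown -> None
-- FAMILY = {m: g for g, ms in ACCENT_GROUPS.items() for m in ms}
-- FAMILY['india'] = 'india'
--
-- # full decision table on (family(detected), family(requested)); default = mismatch
-- OUTCOME = {
--     ('british', 'british'): (True, 'group_match_british'),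
--     ('american', 'american'): (True, 'group_match_american'),
--     ('american', 'british'): (False, 'american_instead_of_british'),
--     ('british', 'american'): (False, 'british_instead_of_american'),
--     ('india', 'british'): (False, 'indian_instead_of_british'),
-- }
--
-- def check_accent_match(detected, requested):
--     """Check if detected accent matches or is acceptable for requested"""
--     if detected == requested:
--         return True, "exact_match"
--     return OUTCOME.get((FAMILY.get(detected), FAMILY.get(requested)), (False, "mismatch"))
-- ===== Notes on version B (the rewrite author's own statement) =====
-- stated objective: alternative
-- what changed: Replaces A's membership-scan loop and if-chain with a decision table: each string is classified once into a family via an inverted index (india as its own family), and the result is a single lookup of the family pair in a precomputed outcome table with 'mismatch' as default.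
import Mathlib
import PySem

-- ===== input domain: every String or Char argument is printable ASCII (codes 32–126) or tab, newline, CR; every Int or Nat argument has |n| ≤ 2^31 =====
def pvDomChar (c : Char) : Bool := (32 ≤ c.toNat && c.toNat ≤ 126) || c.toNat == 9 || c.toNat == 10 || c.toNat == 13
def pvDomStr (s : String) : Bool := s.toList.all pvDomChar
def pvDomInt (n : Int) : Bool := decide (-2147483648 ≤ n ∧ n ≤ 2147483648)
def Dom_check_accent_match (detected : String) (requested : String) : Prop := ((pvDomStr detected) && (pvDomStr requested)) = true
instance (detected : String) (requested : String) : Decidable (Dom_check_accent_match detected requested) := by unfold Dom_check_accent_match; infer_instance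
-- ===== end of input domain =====

-- B replaces A's membership-scan loop and branch chain with a decision table: classify each
-- string into a family via an inverted index, then one lookup of the family pair (alternative).


-- ===== PORT A =====
def ACCENT_GROUPS : List (String × List String) :=
  [("british", ["england", "scotland", "wales", "ireland"]),
   ("american", ["us", "canada"])]

-- A's 'for group, members in ACCENT_GROUPS.items(): if detected in members and requested in members: return …'
def groupLoop (detected requested : String) : List (String × List String) → Option (Bool × String)
  | [] => none
  | (group, members) :: rest =>
    if members.contains detected && members.contains requested then
      some (true, "group_match_" ++ group)
    else groupLoop detected requested rest

def check_accent_match (detected : String) (requested : String) : Bool × String :=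
  if detected == requested then (true, "exact_match")
  else
    match groupLoop detected requested ACCENT_GROUPS with
    | some out => out
    | none =>
      let british := ["england", "scotland", "wales", "ireland"]
      let american := ["us", "canada"]
      if british.contains requested && american.contains detected then
        (false, "american_instead_of_british")
      else if american.contains requested && british.contains detected then
        (false, "british_instead_of_american")
      else if british.contains requested && detected == "india" then
        (false, "indian_instead_of_british")
      else (false, "mismatch")

-- ===== PORT B =====
-- B's family index: {m: g for g, ms in ACCENT_GROUPS.items() for m in ms}; FAMILY['india'] = 'india'
def FAMILY : PySem.Dict String String :=
  (ACCENT_GROUPS.foldl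
    (fun d gm => gm.2.foldl (fun d a => d.insert a gm.1) d)
    PySem.Dict.empty).insert "india" "india"

-- B's decision table on (family(detected), family(requested))
def OUTCOME : PySem.Dict (Option String × Option String) (Bool × String) :=
  PySem.Dict.mk
    [((some "british", some "british"), (true, "group_match_british")),
     ((some "american", some "american"), (true, "group_match_american")),
     ((some "american", some "british"), (false, "american_instead_of_british")),
     ((some "british", some "american"), (false, "british_instead_of_american")),
     ((some "india", some "british"), (false, "indian_instead_of_british"))]

def check_accent_match_alt (detected : String) (requested : String) : Bool × String :=
  if detected == requested then (true, "exact_match")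
  else OUTCOME.getD (FAMILY.get? detected, FAMILY.get? requested) (false, "mismatch")

-- ===== PRECONDITION & SPEC =====
def Spec_check_accent_match (detected : String) (requested : String) (out : Bool × String) : Prop := out = check_accent_match_alt detected requested
instance (detected : String) (requested : String) (out : Bool × String) : Decidable (Spec_check_accent_match detected requested out) := by unfold Spec_check_accent_match; infer_instance

-- ===== CLAIM (what is proved, stated in full; the proofs are below) =====
def Claim_equal_check_accent_match : Prop := ∀ (detected : String) (requested : String), Dom_check_accent_match detected requested → Spec_check_accent_match detected requested (check_accent_match detected requested)

-- ===== LEMMAS AND PROOFS =====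

-- the family index looked up at an arbitrary key, as nested equality tests
theorem get_FAMILY (x : String) :
    FAMILY.get? x =
      if "england" == x then some "british"
      else if "scotland" == x then some "british"
      else if "wales" == x then some "british"
      else if "ireland" == x then some "british"
      else if "us" == x then some "american"
      else if "canada" == x then some "american"
      else if "india" == x then some "india"
      else none := by
  have h : FAMILY = PySem.Dict.mk
      [("england","british"),("scotland","british"),("wales","british"),
       ("ireland","british"),("us","american"),("canada","american"),("india","india")] := by decide
  rw [h]
  simp only [PySem.Dict.get?_mk_cons]
  rfl

-- the decision table looked up at a key whose components are not among the indexed families is empty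
theorem getD_OUTCOME_none_left (y : Option String) :
    OUTCOME.getD (none, y) (false, "mismatch") = (false, "mismatch") := by
  cases y <;> simp [OUTCOME, PySem.Dict.getD, PySem.Dict.get?_mk_cons] <;> rfl

theorem getD_OUTCOME_none_right (x : Option String) :
    OUTCOME.getD (x, none) (false, "mismatch") = (false, "mismatch") := by
  cases x <;> simp [OUTCOME, PySem.Dict.getD, PySem.Dict.get?_mk_cons] <;> rfl

-- every string is one of the seven indexed accent strings or none of them
theorem classify (x : String) :
    x = "england" ∨ x = "scotland" ∨ x = "wales" ∨ x = "ireland" ∨ x = "us" ∨ x = "canada" ∨ x = "india" ∨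
    (x ≠ "england" ∧ x ≠ "scotland" ∧ x ≠ "wales" ∧ x ≠ "ireland" ∧ x ≠ "us" ∧ x ≠ "canada" ∧ x ≠ "india") := by
  by_cases h1 : x = "england" <;> by_cases h2 : x = "scotland" <;> by_cases h3 : x = "wales" <;>
  by_cases h4 : x = "ireland" <;> by_cases h5 : x = "us" <;> by_cases h6 : x = "canada" <;>
  by_cases h7 : x = "india" <;> tauto

set_option maxHeartbeats 2000000 in
set_option maxRecDepth 8000 in
theorem key_lemma (d r : String) : check_accent_match d r = check_accent_match_alt d r := by
  rcases classify d with h|h|h|h|h|h|h|⟨n1,n2,n3,n4,n5,n6,n7⟩ <;>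
  rcases classify r with g|g|g|g|g|g|g|⟨m1,m2,m3,m4,m5,m6,m7⟩ <;>
  first
  | (subst h; subst g; decide)
  | (subst h;
     simp [check_accent_match, check_accent_match_alt, groupLoop, ACCENT_GROUPS,
           get_FAMILY, getD_OUTCOME_none_right, beq_iff_eq, m1, m2, m3, m4, m5, m6,
           Ne.symm m1, Ne.symm m2, Ne.symm m3, Ne.symm m4, Ne.symm m5, Ne.symm m6, Ne.symm m7])
  | (subst g;
     simp [check_accent_match, check_accent_match_alt, groupLoop, ACCENT_GROUPS,
           get_FAMILY, getD_OUTCOME_none_left, beq_iff_eq,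
           n1, n2, n3, n4, n5, n6, n7,
           Ne.symm n1, Ne.symm n2, Ne.symm n3, Ne.symm n4, Ne.symm n5, Ne.symm n6, Ne.symm n7])
  | simp [check_accent_match, check_accent_match_alt, groupLoop, ACCENT_GROUPS,
          get_FAMILY, getD_OUTCOME_none_left, beq_iff_eq,
          m1, m2, m3, m4, m5, m6, n1, n2, n3, n4, n5, n6,
          Ne.symm m1, Ne.symm m2, Ne.symm m3, Ne.symm m4, Ne.symm m5, Ne.symm m6, Ne.symm m7,
          Ne.symm n1, Ne.symm n2, Ne.symm n3, Ne.symm n4, Ne.symm n5, Ne.symm n6, Ne.symm n7]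

-- ===== VERDICT (by name: the statement is the Claim_ definition above) =====
theorem check_accent_match_spec : Claim_equal_check_accent_match := by
  intro d r _
  unfold Spec_check_accent_match
  exact key_lemma d r
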